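-- pv_equiv track=rewrite | github.com/ravalrupalj/BrainTeasers | Edabit/Product_of_remaining.py | can_partition
-- ===== SOURCE A (Python) =====
-- def can_partition(lst):
--
--     l=[]
--     for i in range(0,len(lst)):
--         count = 1
--         for j in range(0,len(lst)):
--             if i!=j:
--                 count = count * lst[j]
--             else:
--                 l.append(i)
--         if count==lst[i]:
--             return True
--     return False
-- ===== SOURCE B (Python) =====
-- def can_partition(lst):
--     n = len(lst)
--     suffix = [1] * (n + 1)
--     for k in range(n - 1, -1, -1):
--         suffix[k] = lst[k] * suffix[k + 1]
--     pre = 1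
--     for k in range(n):
--         if lst[k] == pre * suffix[k + 1]:
--             return True
--         pre *= lst[k]
--     return False
-- ===== Notes on version B (the rewrite author's own statement) =====
-- stated objective: alternative
-- what changed: Replaces the O(n^2)-multiplications nested loops (re-multiplying all other elements for each index) with a precomputed suffix-product array and a running prefix product, so each element is compared to prefix*suffix in a single pass (O(n) multiplications; measured ~13-25x faster on mid-size inputs, but big-integer product growth dominates both on the largest inputs, so no unqualified speed claim).
import Mathlib
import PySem

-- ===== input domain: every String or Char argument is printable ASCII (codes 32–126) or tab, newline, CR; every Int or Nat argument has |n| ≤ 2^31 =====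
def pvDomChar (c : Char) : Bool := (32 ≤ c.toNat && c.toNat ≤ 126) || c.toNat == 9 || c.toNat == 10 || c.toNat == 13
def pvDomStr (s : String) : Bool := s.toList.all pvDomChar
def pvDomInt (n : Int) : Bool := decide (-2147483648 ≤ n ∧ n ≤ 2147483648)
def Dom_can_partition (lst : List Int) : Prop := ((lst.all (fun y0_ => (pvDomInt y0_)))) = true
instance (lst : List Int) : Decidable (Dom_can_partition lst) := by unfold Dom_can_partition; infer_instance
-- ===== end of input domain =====

-- B replaces A's nested loops (one inner pass per index) with a suffix-product array plus a running prefix product (objective: alternative single-pass algorithm).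

-- ===== PORT A =====
-- outer 'for i in range(0, len(lst))' with early return; the inner loop is the foldl,
-- carrying (count, l) exactly as A does (l is appended to when i == j and otherwise unused).
def can_partition_goA (lst : List Int) : List Int → List Int → Bool
  | [], _ => false
  | i :: rest, l =>
    let s := (PySem.List.pyRange 0 (lst.length : Int) 1).foldl
      (fun (s : Int × List Int) j =>
        if i ≠ j then (s.1 * PySem.List.pyGetD lst j 0, s.2) else (s.1, s.2 ++ [i]))
      (1, l)
    if s.1 == PySem.List.pyGetD lst i 0 then true else can_partition_goA lst rest s.2

def can_partition (lst : List Int) : Bool :=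
  can_partition_goA lst (PySem.List.pyRange 0 (lst.length : Int) 1) []

-- ===== PORT B =====
-- suffix[k] = lst[k] * suffix[k+1], built right-to-left (the first loop of Source B)
def can_partition_suf : List Int → List Int
  | [] => [1]
  | x :: xs => (x * (can_partition_suf xs).headD 1) :: can_partition_suf xs

-- second loop of Source B: running prefix product 'pre', compare lst[k] with pre * suffix[k+1]
def can_partition_goB : List Int → List Int → Int → Bool
  | [], _, _ => false
  | x :: xs, suf, pre =>
    if x == pre * ((suf.drop 1).headD 1) then true
    else can_partition_goB xs (suf.drop 1) (pre * x)

def can_partition_alt (lst : List Int) : Bool :=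
  can_partition_goB lst (can_partition_suf lst) 1

-- ===== PRECONDITION & SPEC =====
def Spec_can_partition (lst : List Int) (out : Bool) : Prop := out = can_partition_alt lst
instance (lst : List Int) (out : Bool) : Decidable (Spec_can_partition lst out) := by unfold Spec_can_partition; infer_instance

-- ===== CLAIM (what is proved, stated in full; the proofs are below) =====
def Claim_equal_can_partition : Prop := ∀ (lst : List Int), Dom_can_partition lst → Spec_can_partition lst (can_partition lst)

-- ===== LEMMAS AND PROOFS =====

-- common reference form: ∃ split u ++ x :: v with x = pre * u.prod * v.prod, scanned left to right
def can_partition_chk : List Int → Int → Bool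
  | [], _ => false
  | x :: xs, pre => (x == pre * xs.prod) || can_partition_chk xs (pre * x)

-- ---- B side ----
theorem suf_headD (xs : List Int) : (can_partition_suf xs).headD 1 = xs.prod := by
  induction xs with
  | nil => simp [can_partition_suf]
  | cons x xs ih => rw [can_partition_suf, List.headD_cons, ih, List.prod_cons]

theorem goB_eq_chk (xs : List Int) : ∀ pre, can_partition_goB xs (can_partition_suf xs) pre = can_partition_chk xs pre := by
  induction xs with
  | nil => intro pre; rfl
  | cons x xs ih =>
    intro pre
    simp only [can_partition_goB, can_partition_suf, can_partition_chk, List.drop_one,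
      List.tail_cons, suf_headD, ih]
    by_cases h : x = pre * xs.prod <;> simp [h]

theorem alt_eq_chk (lst : List Int) : can_partition_alt lst = can_partition_chk lst 1 :=
  goB_eq_chk lst 1

-- ---- A side ----
-- the first component of A's inner fold ignores the carried list l
theorem fold_fst (lst : List Int) (i : Int) : ∀ (js : List Int) (c : Int) (l : List Int),
    (js.foldl (fun (s : Int × List Int) j =>
        if i ≠ j then (s.1 * PySem.List.pyGetD lst j 0, s.2) else (s.1, s.2 ++ [i])) (c, l)).1
    = js.foldl (fun c j => if i ≠ j then c * PySem.List.pyGetD lst j 0 else c) c := by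
  intro js
  induction js with
  | nil => intro c l; rfl
  | cons j js ih =>
    intro c l
    simp only [List.foldl_cons]
    by_cases h : i ≠ j
    · rw [if_pos h, if_pos h]; exact ih _ _
    · rw [if_neg h, if_neg h]; exact ih _ _

-- on a block of indices all different from i, the inner fold just multiplies them up
theorem fold_skip (lst : List Int) (i : Int) : ∀ (js : List Int), (∀ j ∈ js, i ≠ j) → ∀ c : Int,
    js.foldl (fun c j => if i ≠ j then c * PySem.List.pyGetD lst j 0 else c) c
    = c * (js.map (fun j => PySem.List.pyGetD lst j 0)).prod := by
  intro js
  induction js with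
  | nil => intro _ c; simp
  | cons j js ih =>
    intro h c
    have hj : i ≠ j := h j (by simp)
    simp only [List.foldl_cons, if_pos hj, List.map_cons, List.prod_cons]
    rw [ih (fun j hj => h j (by simp [hj]))]
    ring

theorem map_pyGetD_prefix (lst : List Int) (k : Nat) (hk : k ≤ lst.length) :
    (PySem.List.pyRange 0 (k : Int) 1).map (fun j => PySem.List.pyGetD lst j 0) = lst.take k := by
  have h1 : (PySem.List.pyRange 0 (k : Int) 1).map (fun j => PySem.List.pyGetD lst j 0)
      = (PySem.List.pyRange 0 (k : Int) 1).map (fun j => PySem.List.pyGetD (lst.take k) j 0) := by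
    apply List.map_congr_left
    intro j hj
    rw [PySem.List.mem_pyRange_one] at hj
    rw [PySem.List.pyGetD_eq_getElem lst 0 hj.1 (by omega),
        PySem.List.pyGetD_eq_getElem (lst.take k) 0 hj.1 (by simp; omega)]
    rw [List.getElem_take]
  have hlen : (k : Int) = ((lst.take k).length : Int) := by simp; omega
  rw [h1, hlen, PySem.List.map_pyGetD_pyRange_zero']

-- value of A's inner loop at index k: product of all elements except the k-th
theorem inner_count (lst : List Int) (k : Nat) (hk : k < lst.length) :
    (PySem.List.pyRange 0 (lst.length : Int) 1).foldl
      (fun c j => if (k : Int) ≠ j then c * PySem.List.pyGetD lst j 0 else c) 1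
    = (lst.take k).prod * (lst.drop (k + 1)).prod := by
  rw [PySem.List.pyRange_one_append 0 (k : Int) (lst.length : Int) (by omega) (by omega),
      List.foldl_append]
  rw [fold_skip lst (k : Int) _ (fun j hj => by
        rw [PySem.List.mem_pyRange_one] at hj; omega) 1]
  rw [PySem.List.pyRange_one_cons (a := (k : Int)) (b := (lst.length : Int)) (by omega),
      List.foldl_cons]
  rw [if_neg (by simp)]
  rw [fold_skip lst (k : Int) _ (fun j hj => by
        rw [PySem.List.mem_pyRange_one] at hj; omega)]
  rw [map_pyGetD_prefix lst k (by omega)]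
  rw [PySem.List.map_pyGetD_pyRange' lst 0 (a := (k : Int) + 1) (by omega)]
  have ht : ((k : Int) + 1).toNat = k + 1 := by omega
  rw [ht]
  ring

theorem goA_eq_chk (lst : List Int) : ∀ (m k : Nat) (l : List Int), k + m = lst.length →
    can_partition_goA lst (PySem.List.pyRange (k : Int) (lst.length : Int) 1) l
    = can_partition_chk (lst.drop k) ((lst.take k).prod) := by
  intro m
  induction m with
  | zero =>
    intro k l hk
    rw [PySem.List.pyRange_one_eq_nil (by omega : (lst.length : Int) ≤ (k : Int))]
    rw [List.drop_eq_nil_of_le (by omega)]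
    rfl
  | succ m ih =>
    intro k l hk
    have hkn : k < lst.length := by omega
    rw [PySem.List.pyRange_one_cons (a := (k : Int)) (b := (lst.length : Int)) (by omega)]
    rw [List.drop_eq_getElem_cons hkn]
    simp only [can_partition_goA, can_partition_chk]
    rw [fold_fst, inner_count lst k hkn,
        PySem.List.pyGetD_eq_getElem lst 0 (by omega) (by omega : (k : Int) < (lst.length : Int))]
    simp only [Int.toNat_natCast]
    by_cases h : lst[k] = (lst.take k).prod * (lst.drop (k + 1)).prod
    · simp [h]
    · have hc : ((lst.take k).prod * (lst.drop (k + 1)).prod == lst[k]) = false :=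
        beq_eq_false_iff_ne.mpr (fun he => h he.symm)
      have hc2 : (lst[k] == (lst.take k).prod * (lst.drop (k + 1)).prod) = false :=
        beq_eq_false_iff_ne.mpr h
      simp only [hc, hc2, Bool.false_eq_true, if_false, Bool.false_or]
      have h1 : ((k : Int) + 1) = (((k + 1 : Nat)) : Int) := by push_cast; ring
      rw [h1, ih (k + 1) _ (by omega)]
      congr 1
      rw [List.prod_take_succ lst k hkn]

theorem a_eq_chk (lst : List Int) : can_partition lst = can_partition_chk lst 1 := by
  have h0 := goA_eq_chk lst lst.length 0 [] (by omega)
  simpa [can_partition] using h0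

-- ===== VERDICT (by name: the statement is the Claim_ definition above) =====
theorem can_partition_spec : Claim_equal_can_partition := by
  intro lst _
  unfold Spec_can_partition
  rw [a_eq_chk, alt_eq_chk]
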